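-- pv_equiv track=rewrite | github.com/Helen-Mars/Dask_demo | main.py | pick_var
-- ===== SOURCE A (Python) =====
-- def pick_var(x):
--     if len(x) == 0:
--         return['']
--     else:
--         rest = pick_var(x[1:])
--         new = []
--         for num in x[0][1]:
--             for y in rest:
--                 new.append(x[0][0]+'='+str(num)+';'+ y)
--
--     return new
-- ===== SOURCE B (Python) =====
-- def pick_var(x):
--     acc = ['']
--     for name, vals in x:
--         acc = [a + name + '=' + str(v) + ';' for a in acc for v in vals]
--     return acc
-- ===== Notes on version B (the rewrite author's own statement) =====
-- stated objective: simpler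
-- what changed: Replaced A's recursion over the tail (building suffixes and prepending the head assignment via nested append loops) with a single iterative left fold that extends a list of accumulated prefixes with each variable's assignments.
import Mathlib
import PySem

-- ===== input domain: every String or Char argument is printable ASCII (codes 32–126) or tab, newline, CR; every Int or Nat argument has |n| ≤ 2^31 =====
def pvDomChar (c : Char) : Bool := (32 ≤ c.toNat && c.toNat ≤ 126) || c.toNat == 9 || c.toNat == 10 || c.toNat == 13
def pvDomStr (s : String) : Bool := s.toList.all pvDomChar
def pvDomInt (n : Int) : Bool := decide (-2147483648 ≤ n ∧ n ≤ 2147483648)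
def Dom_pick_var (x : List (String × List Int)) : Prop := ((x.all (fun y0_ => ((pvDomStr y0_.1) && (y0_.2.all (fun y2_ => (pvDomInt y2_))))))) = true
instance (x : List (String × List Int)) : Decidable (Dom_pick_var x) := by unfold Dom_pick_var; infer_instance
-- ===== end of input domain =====

-- B replaces A's recursion-over-the-tail (suffix building) by a single left fold that
-- extends the accumulated prefixes with each variable's assignments (objective: simpler).

-- ===== PORT A =====
-- A: recursive; combines x[0] with the recursive product of the tail via nested append loops.
def pick_var : List (String × List Int) → List String
  | [] => [""]
  | hd :: tl =>
    let rest := pick_var tl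
    hd.2.foldl (fun new num =>
      rest.foldl (fun new y => new ++ [hd.1 ++ "=" ++ PySem.Int.toStr num ++ ";" ++ y]) new) []

-- ===== PORT B =====
-- B: iterative left fold; acc holds the prefixes built from the variables seen so far.
def pick_var_alt (x : List (String × List Int)) : List String :=
  x.foldl (fun acc p =>
    acc.flatMap (fun a => p.2.map (fun v => a ++ p.1 ++ "=" ++ PySem.Int.toStr v ++ ";")))
    [""]

-- ===== PRECONDITION & SPEC =====
def Spec_pick_var (x : List (String × List Int)) (out : List String) : Prop := out = pick_var_alt x
instance (x : List (String × List Int)) (out : List String) : Decidable (Spec_pick_var x out) := by unfold Spec_pick_var; infer_instance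

-- ===== CLAIM (what is proved, stated in full; the proofs are below) =====
def Claim_equal_pick_var : Prop := ∀ (x : List (String × List Int)), Dom_pick_var x → Spec_pick_var x (pick_var x)

-- ===== LEMMAS AND PROOFS =====

-- A's nested append-loops on a cons cell are the flatMap of the tail's product.
theorem pick_var_cons (hd : String × List Int) (tl : List (String × List Int)) :
    pick_var (hd :: tl) =
      hd.2.flatMap (fun num => (pick_var tl).map
        (fun y => hd.1 ++ "=" ++ PySem.Int.toStr num ++ ";" ++ y)) := by
  show hd.2.foldl _ [] = _
  simp only [PySem.List.foldl_append_singleton_eq_map]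
  rw [PySem.List.foldl_append_eq_flatMap]
  simp

-- B's fold starting from any accumulator prepends each accumulated prefix to A's product.
theorem foldl_alt_eq (x : List (String × List Int)) :
    ∀ acc : List String,
      x.foldl (fun acc p =>
        acc.flatMap (fun a => p.2.map (fun v => a ++ p.1 ++ "=" ++ PySem.Int.toStr v ++ ";"))) acc
      = acc.flatMap (fun a => (pick_var x).map (fun s => a ++ s)) := by
  induction x with
  | nil => intro acc; simp [pick_var, String.append_empty]
  | cons hd tl ih =>
    intro acc
    rw [List.foldl_cons, ih, pick_var_cons]
    simp [List.flatMap_assoc, List.map_flatMap, List.flatMap_map, Function.comp_def,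
          String.append_assoc]

-- ===== VERDICT (by name: the statement is the Claim_ definition above) =====
theorem pick_var_spec : Claim_equal_pick_var := by
  intro x _
  show pick_var x = pick_var_alt x
  rw [pick_var_alt, foldl_alt_eq]
  simp [String.empty_append]
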